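-- pv_equiv track=rewrite | github.com/theRate/yandex_algorithms | contest_4/task_B/task_B.py | check
-- ===== SOURCE A (Python) =====
-- def check(flagship, field):
--     ship_counter = 0
--     ship_length = 0
--     ship_multiplier = 1
--     while flagship != 0:
--         ship_counter += ship_multiplier
--         ship_length += flagship * ship_multiplier
--         ship_multiplier += 1
--         flagship -= 1
--
--     return ship_length + ship_counter - 1 <= field
-- ===== SOURCE B (Python) =====
-- def check(flagship, field):
--     # closed forms: sum of multipliers = n(n+1)/2, weighted length sum = n(n+1)(n+2)/6
--     n = flagship
--     ship_counter = n * (n + 1) // 2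
--     ship_length = n * (n + 1) * (n + 2) // 6
--     return ship_length + ship_counter - 1 <= field
-- ===== Notes on version B (the rewrite author's own statement) =====
-- stated objective: faster
-- what changed: Replaced the O(n) while-loop that accumulates the two sums with closed-form polynomial formulas n(n+1)/2 and n(n+1)(n+2)/6.
-- outside the precondition, e.g. on check(-1, 100): A does not finish within the time limit, B returns True
import Mathlib
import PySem

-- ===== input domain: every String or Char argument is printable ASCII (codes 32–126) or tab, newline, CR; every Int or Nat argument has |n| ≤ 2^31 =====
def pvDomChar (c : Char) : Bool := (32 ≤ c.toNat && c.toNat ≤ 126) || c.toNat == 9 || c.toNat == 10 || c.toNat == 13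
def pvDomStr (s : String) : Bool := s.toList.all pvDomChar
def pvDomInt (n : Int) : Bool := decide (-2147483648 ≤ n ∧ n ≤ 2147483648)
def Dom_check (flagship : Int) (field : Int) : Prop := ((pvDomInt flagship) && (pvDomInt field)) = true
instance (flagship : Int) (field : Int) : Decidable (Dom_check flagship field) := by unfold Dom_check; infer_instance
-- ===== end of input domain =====

-- B replaces A's O(n) accumulation loop with closed-form polynomial sums (objective: faster, asymptotic).


-- ===== PORT A =====
-- Python's guard is `flagship != 0` and the body decrements flagship, so for
-- flagship < 0 the Python loop never terminates; the `0 < flagship` guard below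
-- is the totalising form of the same loop (negative inputs are outside Pre_check).
def checkLoop (flagship counter length mult : Int) : Int × Int :=
  if 0 < flagship then
    checkLoop (flagship - 1) (counter + mult) (length + flagship * mult) (mult + 1)
  else (counter, length)
termination_by flagship.toNat
decreasing_by omega

def check (flagship : Int) (field : Int) : Bool :=
  let r := checkLoop flagship 0 0 1
  decide (r.2 + r.1 - 1 ≤ field)

-- ===== PORT B =====
def check_alt (flagship : Int) (field : Int) : Bool :=
  let n := flagship
  let ship_counter := PySem.Int.floordiv (n * (n + 1)) 2
  let ship_length := PySem.Int.floordiv (n * (n + 1) * (n + 2)) 6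
  decide (ship_length + ship_counter - 1 ≤ field)

-- ===== PRECONDITION & SPEC =====
-- Pre_check excludes flagship < 0, on which Python A's while-loop never terminates.
def Pre_check (flagship : Int) (field : Int) : Prop := 0 ≤ flagship
instance (flagship : Int) (field : Int) : Decidable (Pre_check flagship field) := by
  unfold Pre_check; infer_instance

def pvWitness_check : Int × Int := (4, 20)

def Spec_check (flagship : Int) (field : Int) (out : Bool) : Prop := out = check_alt flagship field
instance (flagship : Int) (field : Int) (out : Bool) : Decidable (Spec_check flagship field out) := by
  unfold Spec_check; infer_instance

-- ===== CLAIM (what is proved, stated in full; the proofs are below) =====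
def Claim_equal_check : Prop := ∀ (flagship : Int) (field : Int), Dom_check flagship field → Pre_check flagship field → Spec_check flagship field (check flagship field)

-- ===== LEMMAS AND PROOFS =====

-- Loop invariant in multiplied-out (division-free) form.
theorem checkLoop_closed (k : Nat) : ∀ c l m : Int,
    2 * (checkLoop (k : Int) c l m).1 = 2 * c + 2 * k * m + k * (k - 1) ∧
    6 * (checkLoop (k : Int) c l m).2 = 6 * l + 3 * m * k * (k + 1) + (k - 1) * k * (k + 1) := by
  induction k with
  | zero => intro c l m; simp [checkLoop]
  | succ k ih =>
    intro c l m
    rw [checkLoop]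
    have hpos : (0 : Int) < (k + 1 : Nat) := by exact_mod_cast Nat.succ_pos k
    rw [if_pos hpos]
    have hk : ((k + 1 : Nat) : Int) - 1 = (k : Int) := by push_cast; ring
    rw [hk]
    obtain ⟨h1, h2⟩ := ih (c + m) (l + ((k + 1 : Nat) : Int) * m) (m + 1)
    constructor
    · rw [h1]; push_cast; ring
    · rw [h2]; push_cast; ring

theorem check_spec : Claim_equal_check := by
  intro flagship field _ hpre
  unfold Spec_check check check_alt
  set k : Nat := flagship.toNat with hk
  have hfs : flagship = (k : Int) := by simp [hk, Int.toNat_of_nonneg hpre]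
  obtain ⟨h1, h2⟩ := checkLoop_closed k 0 0 1
  rw [hfs]
  have hc : (checkLoop (k : Int) 0 0 1).1 = PySem.Int.floordiv ((k : Int) * ((k : Int) + 1)) 2 := by
    have : (k : Int) * ((k : Int) + 1) = (checkLoop (k : Int) 0 0 1).1 * 2 := by
      linarith [h1]
    rw [this, PySem.Int.floordiv_eq_ediv_of_pos (by norm_num)]
    simp
  have hl : (checkLoop (k : Int) 0 0 1).2
      = PySem.Int.floordiv ((k : Int) * ((k : Int) + 1) * ((k : Int) + 2)) 6 := by
    have : (k : Int) * ((k : Int) + 1) * ((k : Int) + 2) = (checkLoop (k : Int) 0 0 1).2 * 6 := by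
      linarith [h2]
    rw [this, PySem.Int.floordiv_eq_ediv_of_pos (by norm_num)]
    simp
  simp only [hc, hl]
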